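-- pv_equiv track=rewrite | github.com/J-Ellette/Emu-Soft | api/framework.py | _match_route
-- ===== SOURCE A (Python) =====
-- def _match_route(route_pattern: str, request_path: str) -> bool:
--     """Simple route pattern matching.
--
--     Args:
--         route_pattern: Route pattern (e.g., "/api/users/{id}")
--         request_path: Actual request path
--
--     Returns:
--         True if pattern matches
--     """
--     route_parts = route_pattern.split("/")
--     path_parts = request_path.split("/")
--
--     if len(route_parts) != len(path_parts):
--         return False
--
--     for route_part, path_part in zip(route_parts, path_parts):
--         if route_part.startswith("{") and route_part.endswith("}"):
--             # Dynamic segment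
--             continue
--         elif route_part != path_part:
--             return False
--
--     return True
-- ===== SOURCE B (Python) =====
-- def _cut(s):
--     """Split off the first '/'-delimited segment: (segment, rest-after-'/' or None)."""
--     for i, c in enumerate(s):
--         if c == "/":
--             return s[:i], s[i + 1:]
--     return s, None
--
--
-- def _match_route(route_pattern: str, request_path: str) -> bool:
--     p, s = route_pattern, request_path
--     while True:
--         pseg, prest = _cut(p)
--         sseg, srest = _cut(s)
--         if (prest is None) != (srest is None):
--             return False
--         if not (pseg.startswith("{") and pseg.endswith("}")) and pseg != sseg:
--             return False
--         if prest is None: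
--             return True
--         p, s = prest, srest
-- ===== Notes on version B (the rewrite author's own statement) =====
-- stated objective: alternative
-- what changed: B streams through both strings segment by segment with a cursor (peel one '/'-delimited segment at a time and compare/skip it immediately), instead of A's split-both-into-lists, compare-lengths, then zip-and-loop.
import Mathlib
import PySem

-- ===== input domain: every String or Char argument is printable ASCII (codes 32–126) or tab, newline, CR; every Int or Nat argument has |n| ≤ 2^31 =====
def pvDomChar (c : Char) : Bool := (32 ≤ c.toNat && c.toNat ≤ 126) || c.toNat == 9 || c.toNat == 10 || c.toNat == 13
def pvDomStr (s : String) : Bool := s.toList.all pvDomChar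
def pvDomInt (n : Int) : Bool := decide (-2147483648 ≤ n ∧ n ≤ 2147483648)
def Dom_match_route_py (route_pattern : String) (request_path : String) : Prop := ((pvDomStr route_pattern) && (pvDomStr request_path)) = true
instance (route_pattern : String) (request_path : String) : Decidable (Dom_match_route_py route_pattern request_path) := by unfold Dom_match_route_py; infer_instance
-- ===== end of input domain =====

-- B replaces A's split-both/compare-lengths/zip-loop with a single segment-by-segment cursor sweep over the two strings (alternative decomposition, same cost).

-- ===== PORT A =====
-- the for-loop over zip(route_parts, path_parts)
def pvMatchZip : List (List Char × List Char) → Bool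
  | [] => true
  | (route_part, path_part) :: rest =>
    if PySem.Chars.startswith route_part ['{'] && PySem.Chars.endswith route_part ['}'] then
      pvMatchZip rest
    else if route_part ≠ path_part then
      false
    else
      pvMatchZip rest

def match_route_py (route_pattern : String) (request_path : String) : Bool :=
  let route_parts := PySem.Chars.splitOn route_pattern.toList ['/']
  let path_parts := PySem.Chars.splitOn request_path.toList ['/']
  if route_parts.length ≠ path_parts.length then false
  else pvMatchZip (route_parts.zip path_parts)

-- ===== PORT B =====
-- _cut: scan for the first '/'; (segment before it, rest after it or none)
def pvCut : List Char → List Char × Option (List Char)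
  | [] => ([], none)
  | c :: cs =>
    if c = '/' then ([], some cs)
    else
      let r := pvCut cs
      (c :: r.1, r.2)

-- termination fact for the B loop (cited by decreasing_by below)
theorem pvCut_rest_lt : ∀ (cs r : List Char), (pvCut cs).2 = some r → r.length < cs.length := by
  intro cs
  induction cs with
  | nil => intro r h; simp [pvCut] at h
  | cons c cs ih =>
    intro r h
    by_cases hc : c = '/'
    · simp [pvCut, hc] at h; subst h; simp
    · simp [pvCut, hc] at h; have := ih r h; simp; omega

-- the while loop of B: peel one segment from each side, compare, recurse
def pvGoMatch (p s : List Char) : Bool :=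
  if ((pvCut p).2.isNone != (pvCut s).2.isNone) then false
  else if ¬ (PySem.Chars.startswith (pvCut p).1 ['{'] && PySem.Chars.endswith (pvCut p).1 ['}']) ∧ (pvCut p).1 ≠ (pvCut s).1 then false
  else
    match hp : (pvCut p).2, (pvCut s).2 with
    | some p', some s' => pvGoMatch p' s'
    | _, _ => true
termination_by p.length
decreasing_by exact pvCut_rest_lt p p' hp

def match_route_py_alt (route_pattern : String) (request_path : String) : Bool :=
  pvGoMatch route_pattern.toList request_path.toList

-- ===== PRECONDITION & SPEC =====
def Spec_match_route_py (route_pattern : String) (request_path : String) (out : Bool) : Prop := out = match_route_py_alt route_pattern request_path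
instance (route_pattern : String) (request_path : String) (out : Bool) : Decidable (Spec_match_route_py route_pattern request_path out) := by unfold Spec_match_route_py; infer_instance

-- ===== CLAIM (what is proved, stated in full; the proofs are below) =====
def Claim_equal_match_route_py : Prop := ∀ (route_pattern : String) (request_path : String), Dom_match_route_py route_pattern request_path → Spec_match_route_py route_pattern request_path (match_route_py route_pattern request_path)

-- ===== LEMMAS AND PROOFS =====

-- unfolding lemmas for the four shapes of pvGoMatch
theorem pvGoMatch_ss {p s p' s' : List Char} (hp : (pvCut p).2 = some p') (hs : (pvCut s).2 = some s') :
    pvGoMatch p s = if ¬ (PySem.Chars.startswith (pvCut p).1 ['{'] && PySem.Chars.endswith (pvCut p).1 ['}']) ∧ (pvCut p).1 ≠ (pvCut s).1 then false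
      else pvGoMatch p' s' := by
  rw [pvGoMatch]
  simp only [hp, hs, Option.isNone_some, bne_self_eq_false, Bool.false_eq_true, if_false]
  split_ifs with h
  · rfl
  · split
    · rename_i a b heq hbeq
      rw [hp] at heq
      cases heq; cases hbeq; rfl
    · rename_i hcontra
      exact absurd (hcontra p' s' hp rfl) (fun h => h)

theorem pvGoMatch_nn {p s : List Char} (hp : (pvCut p).2 = none) (hs : (pvCut s).2 = none) :
    pvGoMatch p s = if ¬ (PySem.Chars.startswith (pvCut p).1 ['{'] && PySem.Chars.endswith (pvCut p).1 ['}']) ∧ (pvCut p).1 ≠ (pvCut s).1 then false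
      else true := by
  rw [pvGoMatch]
  simp only [hp, hs, Option.isNone_none, bne_self_eq_false, Bool.false_eq_true, if_false]
  split_ifs with h
  · rfl
  · split
    · rename_i a b heq hbeq
      rw [hp] at heq; cases heq
    · rfl

theorem pvGoMatch_ns {p s s' : List Char} (hp : (pvCut p).2 = none) (hs : (pvCut s).2 = some s') :
    pvGoMatch p s = false := by
  rw [pvGoMatch]; simp [hp, hs]

theorem pvGoMatch_sn {p s p' : List Char} (hp : (pvCut p).2 = some p') (hs : (pvCut s).2 = none) :
    pvGoMatch p s = false := by
  rw [pvGoMatch]; simp [hp, hs]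

-- structural description of Python's split("/"), used only in the proofs
def pvSplitSlash : List Char → List (List Char)
  | [] => [[]]
  | c :: cs =>
    if c = '/' then [] :: pvSplitSlash cs
    else (c :: (pvSplitSlash cs).headI) :: (pvSplitSlash cs).tail

theorem pvSplitSlash_ne_nil (cs : List Char) : pvSplitSlash cs ≠ [] := by
  cases cs with
  | nil => simp [pvSplitSlash]
  | cons c cs => by_cases h : c = '/' <;> simp [pvSplitSlash, h]

theorem pvSplitSlash_headI_tail (cs : List Char) :
    (pvSplitSlash cs).headI :: (pvSplitSlash cs).tail = pvSplitSlash cs := by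
  cases hsp : pvSplitSlash cs with
  | nil => exact absurd hsp (pvSplitSlash_ne_nil cs)
  | cons a l => rfl

theorem pvGo_eq (fuel : ℕ) :
    ∀ (l cur : List Char) (acc : List (List Char)), l.length < fuel →
      PySem.Chars.splitOn.go ['/'] fuel l cur acc =
        acc.reverse ++ ((cur.reverse ++ (pvSplitSlash l).headI) :: (pvSplitSlash l).tail) := by
  induction fuel with
  | zero => intro l cur acc h; omega
  | succ n ih =>
    intro l cur acc h
    cases l with
    | nil => simp [PySem.Chars.splitOn.go, pvSplitSlash]
    | cons c rest =>
      by_cases hc : c = '/'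
      · subst hc
        rw [PySem.Chars.splitOn.go]
        simp only [List.isPrefixOf, BEq.rfl, Bool.true_and, if_pos]
        rw [show List.drop (['/'] : List Char).length ('/' :: rest) = rest from rfl]
        rw [ih rest [] (cur.reverse :: acc) (by simp at h ⊢; omega)]
        simp [pvSplitSlash]
        exact pvSplitSlash_headI_tail rest
      · rw [PySem.Chars.splitOn.go]
        have hpre : List.isPrefixOf ['/'] (c :: rest) = false := by
          simp [List.isPrefixOf]; exact fun hh => (hc hh.symm).elim
        simp only [hpre, Bool.false_eq_true, if_false]
        rw [ih rest (c :: cur) acc (by simp at h ⊢; omega)]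
        simp [pvSplitSlash, hc]

theorem pvSplitOn_eq (cs : List Char) :
    PySem.Chars.splitOn cs ['/'] = pvSplitSlash cs := by
  have h := pvGo_eq (cs.length + 1) cs [] [] (by omega)
  cases hsp : pvSplitSlash cs with
  | nil => exact absurd hsp (pvSplitSlash_ne_nil cs)
  | cons a l =>
    rw [hsp] at h
    simpa [PySem.Chars.splitOn] using h

theorem pvSplitSlash_none {cs : List Char} (h : (pvCut cs).2 = none) :
    pvSplitSlash cs = [(pvCut cs).1] := by
  induction cs with
  | nil => simp [pvSplitSlash, pvCut]
  | cons c cs ih =>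
    by_cases hc : c = '/'
    · simp [pvCut, hc] at h
    · simp [pvCut, hc] at h ⊢
      rw [pvSplitSlash]
      simp [hc, ih h]

theorem pvSplitSlash_some {cs r : List Char} (h : (pvCut cs).2 = some r) :
    pvSplitSlash cs = (pvCut cs).1 :: pvSplitSlash r := by
  induction cs with
  | nil => simp [pvCut] at h
  | cons c cs ih =>
    by_cases hc : c = '/'
    · simp [pvCut, hc] at h ⊢
      subst h
      simp [pvSplitSlash]
    · simp [pvCut, hc] at h ⊢
      rw [pvSplitSlash]
      simp [hc, ih h]

-- A's whole check on already-split lists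
def pvAEval (ps qs : List (List Char)) : Bool :=
  if ps.length ≠ qs.length then false else pvMatchZip (ps.zip qs)

theorem pvAEval_one (a b : List Char) :
    pvAEval [a] [b] = if ¬ (PySem.Chars.startswith a ['{'] && PySem.Chars.endswith a ['}']) ∧ a ≠ b then false else true := by
  simp only [pvAEval, List.length_cons, List.length_nil, List.zip_cons_cons, List.zip_nil_right]
  rw [pvMatchZip]
  split_ifs with h1 h2 h3 <;> simp_all [pvMatchZip]

theorem pvMain (n : ℕ) : ∀ (p s : List Char), p.length ≤ n →
    pvAEval (pvSplitSlash p) (pvSplitSlash s) = pvGoMatch p s := by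
  induction n with
  | zero =>
    intro p s h
    have hp0 : p = [] := List.length_eq_zero_iff.mp (by omega)
    subst hp0
    have hpn : (pvCut ([] : List Char)).2 = none := by simp [pvCut]
    cases hs : (pvCut s).2 with
    | none =>
      rw [pvGoMatch_nn hpn hs, pvSplitSlash_none hpn, pvSplitSlash_none hs, pvAEval_one]
    | some s' =>
      rw [pvGoMatch_ns hpn hs, pvSplitSlash_none hpn, pvSplitSlash_some hs]
      have hlen0 : (pvSplitSlash s').length ≠ 0 := by
        simpa [List.length_eq_zero_iff] using pvSplitSlash_ne_nil s'
      unfold pvAEval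
      simp only [List.length_cons, List.length_nil]
      rw [if_pos (by omega)]
  | succ n ih =>
    intro p s h
    cases hp : (pvCut p).2 with
    | none =>
      cases hs : (pvCut s).2 with
      | none =>
        rw [pvGoMatch_nn hp hs, pvSplitSlash_none hp, pvSplitSlash_none hs, pvAEval_one]
      | some s' =>
        rw [pvGoMatch_ns hp hs, pvSplitSlash_none hp, pvSplitSlash_some hs]
        have hlen0 : (pvSplitSlash s').length ≠ 0 := by
          simpa [List.length_eq_zero_iff] using pvSplitSlash_ne_nil s'
        unfold pvAEval
        simp only [List.length_cons, List.length_nil]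
        rw [if_pos (by omega)]
    | some p' =>
      cases hs : (pvCut s).2 with
      | none =>
        rw [pvGoMatch_sn hp hs, pvSplitSlash_some hp, pvSplitSlash_none hs]
        have hlen0 : (pvSplitSlash p').length ≠ 0 := by
          simpa [List.length_eq_zero_iff] using pvSplitSlash_ne_nil p'
        unfold pvAEval
        simp only [List.length_cons, List.length_nil]
        rw [if_pos (by omega)]
      | some s' =>
        have hlt := pvCut_rest_lt p p' hp
        have ihe := ih p' s' (by omega)
        rw [pvGoMatch_ss hp hs, pvSplitSlash_some hp, pvSplitSlash_some hs, ← ihe]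
        unfold pvAEval
        simp only [List.length_cons, List.zip_cons_cons]
        by_cases hlen : (pvSplitSlash p').length = (pvSplitSlash s').length
        · simp only [hlen, ne_eq, not_true_eq_false, if_false]
          rw [pvMatchZip]
          split_ifs with hdy heq hb <;> simp_all
        · have hne : (pvSplitSlash p').length + 1 ≠ (pvSplitSlash s').length + 1 := by omega
          simp only [ne_eq, hne, not_false_eq_true, hlen, if_pos]
          split_ifs <;> rfl

-- ===== VERDICT (by name: the statement is the Claim_ definition above) =====
theorem match_route_py_spec : Claim_equal_match_route_py := by
  intro route_pattern request_path _
  unfold Spec_match_route_py match_route_py match_route_py_alt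
  rw [pvSplitOn_eq, pvSplitOn_eq]
  exact pvMain route_pattern.toList.length route_pattern.toList request_path.toList (le_refl _)
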